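-- pv_equiv track=rewrite | github.com/Daethalous/2stepsP2C | core/repo_index.py | _forward_reachable
-- ===== SOURCE A (Python) =====
-- from collections import defaultdict, deque
-- from typing import Any, Dict, List, Optional
--
-- def _forward_reachable(file_neighbors: Dict[str, Dict[str, List[str]]], start: str, max_depth: int = 3) -> List[str]:
--     visited = set()
--     queue = deque([(start, 0)])
--     ordered: List[str] = []
--     while queue:
--         current, depth = queue.popleft()
--         if depth >= max_depth:
--             continue
--         neighbors = file_neighbors.get(current, {})
--         for nxt in neighbors.get("imports", []) + neighbors.get("calls", []):
--             if nxt in visited: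
--                 continue
--             visited.add(nxt)
--             ordered.append(nxt)
--             queue.append((nxt, depth + 1))
--     return ordered
-- ===== SOURCE B (Python) =====
-- from typing import Dict, List
--
--
-- def _forward_reachable(file_neighbors: Dict[str, Dict[str, List[str]]], start: str, max_depth: int = 3) -> List[str]:
--     # Enumerate-then-dedup: record the raw per-level edge-target stream and recover the
--     # discovery order with a single dict.fromkeys pass at the end.
--     stream: List[str] = []
--     seen = set()
--     frontier = [start]
--     for _ in range(max_depth):
--         if not frontier:
--             break
--         layer: List[str] = []
--         for node in frontier:
--             nb = file_neighbors.get(node, {})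
--             layer += nb.get("imports", []) + nb.get("calls", [])
--         frontier = [n for n in dict.fromkeys(layer) if n not in seen]
--         seen.update(layer)
--         stream += layer
--     return list(dict.fromkeys(stream))
-- ===== Notes on version B (the rewrite author's own statement) =====
-- stated objective: alternative
-- what changed: Replaced A's dedup-at-discovery BFS (a deque of (node, depth) tuples, with the visited set, the output list and the queue all updated per discovered node) by an enumerate-then-dedup decomposition: each level records the raw edge-target stream of the whole frontier, the next frontier is computed declaratively as dict.fromkeys(layer) minus seen, and the output list is never maintained during the traversal but recovered by a single dict.fromkeys pass over the stream at the end.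
import Mathlib
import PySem

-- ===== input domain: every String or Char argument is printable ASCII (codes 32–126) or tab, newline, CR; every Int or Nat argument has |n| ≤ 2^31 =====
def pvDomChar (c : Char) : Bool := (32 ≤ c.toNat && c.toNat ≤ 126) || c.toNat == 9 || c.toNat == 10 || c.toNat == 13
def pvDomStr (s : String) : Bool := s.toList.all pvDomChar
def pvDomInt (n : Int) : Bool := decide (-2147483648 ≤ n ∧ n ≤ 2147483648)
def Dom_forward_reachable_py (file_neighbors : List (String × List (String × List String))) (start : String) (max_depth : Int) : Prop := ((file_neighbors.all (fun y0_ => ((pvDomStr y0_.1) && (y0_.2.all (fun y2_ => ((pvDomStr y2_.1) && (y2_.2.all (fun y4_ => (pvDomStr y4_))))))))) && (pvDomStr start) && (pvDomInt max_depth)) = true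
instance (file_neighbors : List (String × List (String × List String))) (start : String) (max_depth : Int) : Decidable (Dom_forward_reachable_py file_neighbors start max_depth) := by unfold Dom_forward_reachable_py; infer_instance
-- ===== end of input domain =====

-- B replaces A's (node, depth)-tagged deque and dedup-at-discovery with an enumerate-then-dedup
-- decomposition: per level it records the raw edge-target stream and recovers the output by one
-- dict.fromkeys pass at the end (objective: alternative; same asymptotic cost).

-- ===== PORT A =====
-- shared transliteration of the line
--   neighbors = file_neighbors.get(current, {}); neighbors.get("imports", []) + neighbors.get("calls", [])
-- which appears verbatim in both Pythons
def pvNbrs (fn : List (String × List (String × List String))) (cur : String) : List String :=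
  let neighbors := PySem.Dict.getD (PySem.Dict.mk fn) cur []
  PySem.Dict.getD (PySem.Dict.mk neighbors) "imports" [] ++ PySem.Dict.getD (PySem.Dict.mk neighbors) "calls" []

-- the while-loop of A; fuel is only a totality guard (each iteration pops one element),
-- proved sufficient below
def pvRunA (fn : List (String × List (String × List String))) (md : Int) :
    Nat → List (String × Int) → PySem.Set String → List String → List String
  | 0, _, _, ordered => ordered
  | _ + 1, [], _, ordered => ordered
  | fuel + 1, (cur, depth) :: rest, visited, ordered =>
    if depth ≥ md then pvRunA fn md fuel rest visited ordered
    else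
      let s := (pvNbrs fn cur).foldl
        (fun (st : List (String × Int) × PySem.Set String × List String) nxt =>
          if PySem.Set.contains st.2.1 nxt then st
          else (st.1 ++ [(nxt, depth + 1)], PySem.Set.add st.2.1 nxt, st.2.2 ++ [nxt]))
        (rest, visited, ordered)
      pvRunA fn md fuel s.1 s.2.1 s.2.2

def forward_reachable_py (file_neighbors : List (String × List (String × List String))) (start : String) (max_depth : Int) : List String :=
  pvRunA file_neighbors max_depth
    ((file_neighbors.flatMap (fun p => p.2.flatMap (fun q => q.2))).length + 1)
    [(start, 0)] PySem.Set.empty []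

-- ===== PORT B =====
-- the 'for _ in range(max_depth)' loop of B with its early 'if not frontier: break',
-- as a counter recursion over the remaining iteration count, on the state (stream, seen, frontier)
def pvAltGo (fn : List (String × List (String × List String))) :
    Nat → List String × PySem.Set String × List String →
    List String × PySem.Set String × List String
  | 0, st => st
  | k + 1, st =>
    if st.2.2.isEmpty then st
    else
      let layer := st.2.2.foldl (fun acc node => acc ++ pvNbrs fn node) []
      let frontier := (PySem.List.dedup layer).filter (fun n => !(PySem.Set.contains st.2.1 n))
      pvAltGo fn k (st.1 ++ layer, PySem.Set.update st.2.1 layer, frontier)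

def forward_reachable_py_alt (file_neighbors : List (String × List (String × List String))) (start : String) (max_depth : Int) : List String :=
  PySem.List.dedup (pvAltGo file_neighbors max_depth.toNat ([], PySem.Set.empty, [start])).1

-- ===== PRECONDITION & SPEC =====
def Spec_forward_reachable_py (file_neighbors : List (String × List (String × List String))) (start : String) (max_depth : Int) (out : List String) : Prop := out = forward_reachable_py_alt file_neighbors start max_depth
instance (file_neighbors : List (String × List (String × List String))) (start : String) (max_depth : Int) (out : List String) : Decidable (Spec_forward_reachable_py file_neighbors start max_depth out) := by unfold Spec_forward_reachable_py; infer_instance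

-- ===== CLAIM (what is proved, stated in full; the proofs are below) =====
def Claim_equal_forward_reachable_py : Prop := ∀ (file_neighbors : List (String × List (String × List String))) (start : String) (max_depth : Int), Dom_forward_reachable_py file_neighbors start max_depth → Spec_forward_reachable_py file_neighbors start max_depth (forward_reachable_py file_neighbors start max_depth)

-- ===== LEMMAS AND PROOFS =====

-- Bool bridges for Set.contains
lemma pvContains_true {s : PySem.Set String} {x : String} (h : x ∈ s) :
    PySem.Set.contains s x = true := (PySem.Set.contains_iff s x).2 h

lemma pvContains_false {s : PySem.Set String} {x : String} (h : x ∉ s) :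
    PySem.Set.contains s x = false :=
  Bool.eq_false_iff.2 (fun hc => h ((PySem.Set.contains_iff s x).1 hc))

lemma pvNotContains_true {s : PySem.Set String} {x : String} (h : x ∉ s) :
    (!(PySem.Set.contains s x)) = true := by rw [pvContains_false h]; rfl

lemma pvNotContains_false {s : PySem.Set String} {x : String} (h : x ∈ s) :
    (!(PySem.Set.contains s x)) = false := by rw [pvContains_true h]; rfl

-- multiset of every string occurring in some imports/calls list; fuel accounting
def pvAll (fn : List (String × List (String × List String))) : List String :=
  fn.flatMap (fun p => p.2.flatMap (fun q => q.2))

def pvCnt (fn : List (String × List (String × List String))) (v : PySem.Set String) : Nat :=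
  ((pvAll fn).filter (fun x => !(PySem.Set.contains v x))).length

-- first occurrences in ns that are fresh w.r.t. v (A's per-level discovery list)
def pvDisc (v : PySem.Set String) : List String → List String
  | [] => []
  | n :: ns => if PySem.Set.contains v n then pvDisc v ns else n :: pvDisc (PySem.Set.add v n) ns

-- A's expansion of one whole level, in spec form
def pvExpand (fn : List (String × List (String × List String))) :
    List String → List String → PySem.Set String → List String →
    List String × PySem.Set String × List String
  | [], nq, v, o => (nq, v, o)
  | cur :: rest, nq, v, o =>
    pvExpand fn rest (nq ++ pvDisc v (pvNbrs fn cur)) (PySem.Set.update v (pvNbrs fn cur))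
      (o ++ pvDisc v (pvNbrs fn cur))

-- A as a level-synchronous loop
def pvLoopA (fn : List (String × List (String × List String))) :
    Nat → List String → PySem.Set String → List String → List String
  | 0, _, _, o => o
  | k + 1, front, v, o =>
    let s := pvExpand fn front [] v o
    pvLoopA fn k s.1 s.2.1 s.2.2

lemma pvGetD_mem {ν : Type} : ∀ (l : List (String × ν)) (k : String) (d0 : ν),
    PySem.Dict.getD (PySem.Dict.mk l) k d0 = d0 ∨
      ∃ p ∈ l, PySem.Dict.getD (PySem.Dict.mk l) k d0 = p.2 := by
  intro l k d0
  induction l with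
  | nil => left; rfl
  | cons h t ih =>
    obtain ⟨a, b⟩ := h
    rw [PySem.Dict.getD_eq_get?_getD, PySem.Dict.get?_mk_cons]
    by_cases hk : (a == k) = true
    · right
      exact ⟨(a, b), List.mem_cons_self, by rw [if_pos hk]; rfl⟩
    · rw [if_neg hk, ← PySem.Dict.getD_eq_get?_getD]
      rcases ih with h1 | ⟨p, hp, h2⟩
      · left; exact h1
      · right; exact ⟨p, List.mem_cons_of_mem _ hp, h2⟩

lemma pvNbrs_subset (fn : List (String × List (String × List String))) (cur : String) :
    ∀ x ∈ pvNbrs fn cur, x ∈ pvAll fn := by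
  intro x hx
  unfold pvNbrs at hx
  set nb := PySem.Dict.getD (PySem.Dict.mk fn) cur ([] : List (String × List String)) with hnb
  have hinner : x ∈ nb.flatMap (fun q => q.2) := by
    rcases List.mem_append.1 hx with hx' | hx'
    · rcases pvGetD_mem nb "imports" [] with he | ⟨p, hp, he⟩
      · rw [he] at hx'; cases hx'
      · rw [he] at hx'; exact List.mem_flatMap.2 ⟨p, hp, hx'⟩
    · rcases pvGetD_mem nb "calls" [] with he | ⟨p, hp, he⟩
      · rw [he] at hx'; cases hx'
      · rw [he] at hx'; exact List.mem_flatMap.2 ⟨p, hp, hx'⟩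
  rcases pvGetD_mem fn cur ([] : List (String × List String)) with he | ⟨p, hp, he⟩
  · rw [← hnb] at he; rw [he] at hinner; cases hinner
  · rw [← hnb] at he; rw [he] at hinner
    exact List.mem_flatMap.2 ⟨p, hp, hinner⟩

lemma pvFilter_length_le {α : Type} (l : List α) (p q : α → Bool)
    (himp : ∀ a, q a = true → p a = true) : (l.filter q).length ≤ (l.filter p).length := by
  induction l with
  | nil => simp
  | cons h t ih =>
    by_cases hq : q h = true
    · rw [List.filter_cons_of_pos hq, List.filter_cons_of_pos (himp h hq)]
      simpa using ih
    · rw [List.filter_cons_of_neg (by simpa using hq)]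
      by_cases hp : p h = true
      · rw [List.filter_cons_of_pos hp]; simp; omega
      · rw [List.filter_cons_of_neg (by simpa using hp)]; exact ih

lemma pvFilter_length_lt {α : Type} (l : List α) (p q : α → Bool)
    (himp : ∀ a, q a = true → p a = true) (x : α) (hx : x ∈ l)
    (hp : p x = true) (hq : q x = false) :
    (l.filter q).length < (l.filter p).length := by
  induction l with
  | nil => cases hx
  | cons h t ih =>
    rcases List.mem_cons.1 hx with rfl | hx'
    · rw [List.filter_cons_of_pos hp, List.filter_cons_of_neg (by simp [hq])]
      have := pvFilter_length_le t p q himp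
      simp; omega
    · by_cases hqh : q h = true
      · rw [List.filter_cons_of_pos hqh, List.filter_cons_of_pos (himp h hqh)]
        have := ih hx'
        simp; omega
      · rw [List.filter_cons_of_neg (by simpa using hqh)]
        have := ih hx'
        by_cases hph : p h = true
        · rw [List.filter_cons_of_pos hph]; simp; omega
        · rw [List.filter_cons_of_neg (by simpa using hph)]; exact this

lemma pvCnt_add_lt (fn : List (String × List (String × List String)))
    (v : PySem.Set String) (x : String) (hx : x ∈ pvAll fn) (hnx : x ∉ v) :
    pvCnt fn (PySem.Set.add v x) < pvCnt fn v := by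
  apply pvFilter_length_lt _ _ _ _ x hx
  · exact pvNotContains_true hnx
  · exact pvNotContains_false ((PySem.Set.mem_add v x x).2 (Or.inr rfl))
  · intro a ha
    by_cases hm : a ∈ v
    · rw [pvNotContains_false ((PySem.Set.mem_add v x a).2 (Or.inl hm))] at ha; cases ha
    · exact pvNotContains_true hm

lemma pvDisc_measure (fn : List (String × List (String × List String))) :
    ∀ (ns : List String) (v : PySem.Set String), (∀ x ∈ ns, x ∈ pvAll fn) →
      (pvDisc v ns).length + pvCnt fn (PySem.Set.update v ns) ≤ pvCnt fn v := by
  intro ns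
  induction ns with
  | nil => intro v _; simp [pvDisc, PySem.Set.update_nil]
  | cons n t ih =>
    intro v h
    have hn : n ∈ pvAll fn := h n (by simp)
    have ht : ∀ x ∈ t, x ∈ pvAll fn := fun x hx => h x (by simp [hx])
    rw [PySem.Set.update_cons]
    by_cases hc : n ∈ v
    · rw [pvDisc, if_pos (pvContains_true hc), PySem.Set.add_of_mem hc]
      exact ih v ht
    · rw [pvDisc, if_neg (by rw [pvContains_false hc]; simp)]
      have h1 := ih (PySem.Set.add v n) ht
      have h2 := pvCnt_add_lt fn v n hn hc
      simp only [List.length_cons]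
      omega

lemma pvExpand_measure (fn : List (String × List (String × List String))) :
    ∀ (front nq : List String) (v : PySem.Set String) (o : List String),
      (pvExpand fn front nq v o).1.length + pvCnt fn (pvExpand fn front nq v o).2.1 ≤
        nq.length + pvCnt fn v := by
  intro front
  induction front with
  | nil => intro nq v o; simp [pvExpand]
  | cons cur rest ih =>
    intro nq v o
    rw [pvExpand]
    have h1 := pvDisc_measure fn (pvNbrs fn cur) v (pvNbrs_subset fn cur)
    have h2 := ih (nq ++ pvDisc v (pvNbrs fn cur)) (PySem.Set.update v (pvNbrs fn cur))
      (o ++ pvDisc v (pvNbrs fn cur))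
    rw [List.length_append] at h2
    omega

lemma pvRunA_nil (fn : List (String × List (String × List String))) (md : Int)
    (v : PySem.Set String) (o : List String) : ∀ f, pvRunA fn md f [] v o = o := by
  intro f; cases f <;> rfl

lemma pvRunA_skip (fn : List (String × List (String × List String))) (md : Int) (d : Int)
    (hd : md ≤ d) : ∀ (front : List String) (f : Nat) (v : PySem.Set String) (o : List String),
    pvRunA fn md (f + front.length) (front.map (fun n => (n, d))) v o = pvRunA fn md f [] v o := by
  intro front
  induction front with
  | nil => intro f v o; rfl
  | cons n t ih =>
    intro f v o
    show pvRunA fn md ((f + t.length) + 1) ((n, d) :: t.map (fun n => (n, d))) v o = _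
    rw [pvRunA, if_pos (by omega)]
    exact ih f v o

lemma pvFoldA_eq (d : Int) :
    ∀ (ns : List String) (rest : List (String × Int)) (nq : List String)
      (v : PySem.Set String) (o : List String),
      ns.foldl
        (fun (st : List (String × Int) × PySem.Set String × List String) nxt =>
          if PySem.Set.contains st.2.1 nxt then st
          else (st.1 ++ [(nxt, d)], PySem.Set.add st.2.1 nxt, st.2.2 ++ [nxt]))
        (rest ++ nq.map (fun n => (n, d)), v, o)
      = (rest ++ (nq ++ pvDisc v ns).map (fun n => (n, d)), PySem.Set.update v ns,
         o ++ pvDisc v ns) := by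
  intro ns
  induction ns with
  | nil => intro rest nq v o; simp [pvDisc, PySem.Set.update_nil]
  | cons n t ih =>
    intro rest nq v o
    rw [List.foldl_cons]
    by_cases hc : n ∈ v
    · rw [if_pos (pvContains_true hc)]
      rw [ih rest nq v o, pvDisc, if_pos (pvContains_true hc),
        PySem.Set.update_cons, PySem.Set.add_of_mem hc]
    · rw [if_neg (by rw [pvContains_false hc]; simp)]
      have hstep : ((rest ++ nq.map (fun n => (n, d))) ++ [(n, d)],
          PySem.Set.add v n, o ++ [n])
          = (rest ++ (nq ++ [n]).map (fun n => (n, d)), PySem.Set.add v n, o ++ [n]) := by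
        simp [List.map_append, List.append_assoc]
      rw [hstep, ih rest (nq ++ [n]) (PySem.Set.add v n) (o ++ [n]),
        pvDisc, if_neg (by rw [pvContains_false hc]; simp), PySem.Set.update_cons]
      simp [List.append_assoc]

lemma pvRunA_expand (fn : List (String × List (String × List String))) (md : Int) (d : Int)
    (hd : d < md) : ∀ (front : List String) (nq : List String) (f : Nat)
      (v : PySem.Set String) (o : List String),
    pvRunA fn md (f + front.length)
      (front.map (fun n => (n, d)) ++ nq.map (fun n => (n, d + 1))) v o
    = pvRunA fn md f ((pvExpand fn front nq v o).1.map (fun n => (n, d + 1)))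
        (pvExpand fn front nq v o).2.1 (pvExpand fn front nq v o).2.2 := by
  intro front
  induction front with
  | nil => intro nq f v o; simp [pvExpand]
  | cons cur t ih =>
    intro nq f v o
    show pvRunA fn md ((f + t.length) + 1)
        ((cur, d) :: (t.map (fun n => (n, d)) ++ nq.map (fun n => (n, d + 1)))) v o = _
    rw [pvRunA, if_neg (by omega)]
    rw [pvFoldA_eq (d + 1) (pvNbrs fn cur) (t.map (fun n => (n, d))) nq v o]
    rw [ih (nq ++ pvDisc v (pvNbrs fn cur)) f (PySem.Set.update v (pvNbrs fn cur))
      (o ++ pvDisc v (pvNbrs fn cur))]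
    rw [pvExpand]

lemma pvRunA_loop (fn : List (String × List (String × List String))) (md : Int) :
    ∀ (K : Nat) (f : Nat) (front : List String) (v : PySem.Set String) (o : List String),
      front.length + pvCnt fn v ≤ f →
      pvRunA fn md f (front.map (fun n => (n, md - (K : Int)))) v o = pvLoopA fn K front v o := by
  intro K
  induction K with
  | zero =>
    intro f front v o hf
    have hsplit : f = (f - front.length) + front.length := by omega
    rw [hsplit, pvRunA_skip fn md (md - ((0 : Nat) : Int)) (by simp) front,
      pvRunA_nil, pvLoopA]
  | succ K ih =>
    intro f front v o hf
    have hd : md - ((K + 1 : Nat) : Int) < md := by push_cast; omega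
    have hsplit : f = (f - front.length) + front.length := by omega
    have hnq : front.map (fun n => (n, md - ((K + 1 : Nat) : Int)))
        = front.map (fun n => (n, md - ((K + 1 : Nat) : Int)))
          ++ ([] : List String).map (fun n => (n, md - ((K + 1 : Nat) : Int) + 1)) := by simp
    rw [hsplit, hnq, pvRunA_expand fn md _ hd front [] (f - front.length) v o]
    have harith : md - ((K + 1 : Nat) : Int) + 1 = md - (K : Int) := by push_cast; omega
    rw [harith]
    have hm := pvExpand_measure fn front [] v o
    rw [ih (f - front.length) (pvExpand fn front [] v o).1 (pvExpand fn front [] v o).2.1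
      (pvExpand fn front [] v o).2.2 (by simp at hm; omega)]
    rfl

lemma pvDisc_append (v : PySem.Set String) (xs ys : List String) :
    pvDisc v (xs ++ ys) = pvDisc v xs ++ pvDisc (PySem.Set.update v xs) ys := by
  induction xs generalizing v with
  | nil => simp [pvDisc, PySem.Set.update_nil]
  | cons n t ih =>
    rw [List.cons_append, PySem.Set.update_cons]
    by_cases hc : n ∈ v
    · rw [pvDisc, if_pos (pvContains_true hc), pvDisc, if_pos (pvContains_true hc),
        PySem.Set.add_of_mem hc, ih]
    · rw [pvDisc, if_neg (by rw [pvContains_false hc]; simp),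
        pvDisc, if_neg (by rw [pvContains_false hc]; simp), ih, List.cons_append]

lemma pvExpand_concat (fn : List (String × List (String × List String))) :
    ∀ (front nq : List String) (v : PySem.Set String) (o : List String),
      pvExpand fn front nq v o =
        (nq ++ pvDisc v (front.flatMap (pvNbrs fn)),
         PySem.Set.update v (front.flatMap (pvNbrs fn)),
         o ++ pvDisc v (front.flatMap (pvNbrs fn))) := by
  intro front
  induction front with
  | nil => intro nq v o; simp [pvExpand, pvDisc, PySem.Set.update_nil]
  | cons cur t ih =>
    intro nq v o
    rw [pvExpand, ih, List.flatMap_cons, pvDisc_append, PySem.Set.update_append]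
    simp [List.append_assoc]

lemma pvDisc_filter_aux (v : PySem.Set String) :
    ∀ (layer : List String) (acc : PySem.Set String),
      (PySem.Set.update acc layer).filter (fun n => !(PySem.Set.contains v n))
        = acc.filter (fun n => !(PySem.Set.contains v n))
          ++ pvDisc (PySem.Set.update v acc) layer := by
  intro layer
  induction layer with
  | nil => intro acc; simp [PySem.Set.update_nil, pvDisc]
  | cons n t ih =>
    intro acc
    rw [PySem.Set.update_cons]
    by_cases hn : n ∈ acc
    · rw [PySem.Set.add_of_mem hn, ih acc, pvDisc,
        if_pos (pvContains_true ((PySem.Set.mem_update v acc n).2 (Or.inr hn)))]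
    · rw [PySem.Set.add_of_not_mem hn, ih (acc ++ [n])]
      have hupd : PySem.Set.update v (acc ++ [n])
          = PySem.Set.add (PySem.Set.update v acc) n := by
        rw [PySem.Set.update_append, PySem.Set.update_cons, PySem.Set.update_nil]
      rw [hupd, List.filter_append]
      by_cases hv : n ∈ v
      · have hmem : n ∈ PySem.Set.update v acc := (PySem.Set.mem_update v acc n).2 (Or.inl hv)
        rw [PySem.Set.add_of_mem hmem, pvDisc, if_pos (pvContains_true hmem)]
        have hfil : List.filter (fun n => !(PySem.Set.contains v n)) [n] = [] := by simp [hv]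
        rw [hfil, List.append_nil]
      · have hmem : n ∉ PySem.Set.update v acc := fun hm => by
          rcases (PySem.Set.mem_update v acc n).1 hm with h | h
          · exact hv h
          · exact hn h
        rw [pvDisc, if_neg (by rw [pvContains_false hmem]; simp)]
        have hfil : List.filter (fun n => !(PySem.Set.contains v n)) [n] = [n] := by simp [hv]
        rw [hfil, List.append_assoc, List.singleton_append]

lemma pvDisc_eq_filter_dedup (layer : List String) (v : PySem.Set String) :
    pvDisc v layer
      = (PySem.List.dedup layer).filter (fun n => !(PySem.Set.contains v n)) := by
  rw [PySem.List.dedup_eq_ofList]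
  have h2 : PySem.Set.ofList layer = PySem.Set.update ([] : PySem.Set String) layer := rfl
  rw [h2, pvDisc_filter_aux v layer ([] : PySem.Set String)]
  rw [List.filter_nil, List.nil_append, PySem.Set.update_nil]

lemma pvContains_congr {s t : PySem.Set String} (h : ∀ x, x ∈ s ↔ x ∈ t) (x : String) :
    PySem.Set.contains s x = PySem.Set.contains t x := by
  by_cases hx : x ∈ s
  · rw [pvContains_true hx, pvContains_true ((h x).1 hx)]
  · rw [pvContains_false hx, pvContains_false (fun hm => hx ((h x).2 hm))]

lemma pvLoopA_nil_front (fn : List (String × List (String × List String))) :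
    ∀ (K : Nat) (v : PySem.Set String) (o : List String), pvLoopA fn K [] v o = o := by
  intro K
  induction K with
  | zero => intro v o; rfl
  | succ K ih => intro v o; rw [pvLoopA]; exact ih v o

lemma pvBridge (fn : List (String × List (String × List String))) :
    ∀ (K : Nat) (stream : List String) (seen : PySem.Set String) (frontier : List String),
      (∀ x, x ∈ seen ↔ x ∈ stream) →
      pvLoopA fn K frontier seen (PySem.List.dedup stream)
        = PySem.List.dedup (pvAltGo fn K (stream, seen, frontier)).1 := by
  intro K
  induction K with
  | zero => intro stream seen frontier _; rfl
  | succ K ih =>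
    intro stream seen frontier hinv
    by_cases hf : frontier = []
    · subst hf
      rw [pvAltGo, if_pos (by rfl)]
      exact pvLoopA_nil_front fn (K + 1) seen (PySem.List.dedup stream)
    · rw [pvLoopA, pvAltGo, if_neg (by simp [hf])]
      have hlayer : frontier.foldl (fun acc node => acc ++ pvNbrs fn node) []
          = frontier.flatMap (pvNbrs fn) := by
        rw [PySem.List.foldl_append_eq_flatMap]; rfl
      set L := frontier.flatMap (pvNbrs fn) with hL
      have hdisc : pvDisc seen L
          = (PySem.List.dedup L).filter (fun n => !(PySem.Set.contains seen n)) :=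
        pvDisc_eq_filter_dedup L seen
      have hdedup : PySem.List.dedup stream ++ pvDisc seen L
          = PySem.List.dedup (stream ++ L) := by
        rw [PySem.List.dedup_eq_ofList (stream ++ L), PySem.Set.ofList_append,
          PySem.Set.update_eq_append_filter, PySem.List.dedup_eq_ofList stream]
        congr 1
        rw [hdisc, PySem.List.dedup_eq_ofList L]
        apply List.filter_congr
        intro y _
        rw [pvContains_congr (s := seen) (t := PySem.Set.ofList stream)
          (fun x => by rw [PySem.Set.mem_ofList]; exact hinv x) y]
      have hinv' : ∀ x, x ∈ PySem.Set.update seen L ↔ x ∈ stream ++ L := by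
        intro x
        rw [PySem.Set.mem_update, List.mem_append, hinv x]
      calc pvLoopA fn K (pvExpand fn frontier [] seen (PySem.List.dedup stream)).1
            (pvExpand fn frontier [] seen (PySem.List.dedup stream)).2.1
            (pvExpand fn frontier [] seen (PySem.List.dedup stream)).2.2
          = pvLoopA fn K (pvDisc seen L) (PySem.Set.update seen L)
              (PySem.List.dedup (stream ++ L)) := by
            rw [pvExpand_concat fn frontier [] seen (PySem.List.dedup stream)]
            rw [← hdedup]; rfl
        _ = PySem.List.dedup (pvAltGo fn K (stream ++ L, PySem.Set.update seen L,
              pvDisc seen L)).1 := ih (stream ++ L) (PySem.Set.update seen L)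
              (pvDisc seen L) hinv'
        _ = _ := by dsimp only; rw [hdisc, hlayer]

-- ===== VERDICT (by name: the statement is the Claim_ definition above) =====
theorem forward_reachable_py_spec : Claim_equal_forward_reachable_py := by
  intro fn start md _dom
  unfold Spec_forward_reachable_py forward_reachable_py_alt
  rw [← pvBridge fn md.toNat [] PySem.Set.empty [start] (by simp [PySem.Set.empty])]
  unfold forward_reachable_py
  by_cases hmd : 0 < md
  · have h0 : md - (md.toNat : Int) = 0 := by omega
    have : [((start : String), (0 : Int))] = [start].map (fun n => (n, md - (md.toNat : Int))) := by
      simp only [List.map_cons, List.map_nil, h0]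
    rw [this]
    apply pvRunA_loop
    have : pvCnt fn PySem.Set.empty ≤ (pvAll fn).length := List.length_filter_le _ _
    simp only [List.length_cons, List.length_nil]
    unfold pvAll at this
    omega
  · -- max_depth ≤ 0: A pops (start, 0), skips it, and returns []
    have hK : md.toNat = 0 := by omega
    rw [hK]
    show pvRunA fn md (_ + 1) [(start, 0)] PySem.Set.empty [] = pvLoopA fn 0 [start] PySem.Set.empty []
    simp only [pvRunA, pvLoopA]
    rw [if_pos (by omega : (0 : Int) ≥ md)]
    exact pvRunA_nil fn md _ _ _
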